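-- pv_equiv track=rewrite | github.com/saltstack/salt | salt/modules/postgres.py | _process_priv_part
-- ===== SOURCE A (Python) =====
-- _PRIVILEGES_MAP = {
--     "a": "INSERT",
--     "C": "CREATE",
--     "D": "TRUNCATE",
--     "c": "CONNECT",
--     "t": "TRIGGER",
--     "r": "SELECT",
--     "U": "USAGE",
--     "T": "TEMPORARY",
--     "w": "UPDATE",
--     "X": "EXECUTE",
--     "x": "REFERENCES",
--     "d": "DELETE",
--     "*": "GRANT",
-- }
--
-- def _process_priv_part(perms):
--     """
--     Process part
--     """
--     _tmp = {}
--     previous = None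
--     for perm in perms:
--         if previous is None:
--             _tmp[_PRIVILEGES_MAP[perm]] = False
--             previous = _PRIVILEGES_MAP[perm]
--         else:
--             if perm == "*":
--                 _tmp[previous] = True
--             else:
--                 _tmp[_PRIVILEGES_MAP[perm]] = False
--                 previous = _PRIVILEGES_MAP[perm]
--     return _tmp
-- ===== SOURCE B (Python) =====
-- _PRIVILEGES_MAP = {
--     "a": "INSERT",
--     "C": "CREATE",
--     "D": "TRUNCATE",
--     "c": "CONNECT",
--     "t": "TRIGGER",
--     "r": "SELECT",
--     "U": "USAGE",
--     "T": "TEMPORARY",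
--     "w": "UPDATE",
--     "X": "EXECUTE",
--     "x": "REFERENCES",
--     "d": "DELETE",
--     "*": "GRANT",
-- }
--
-- def _process_priv_part(perms):
--     """
--     Process part
--     """
--     _tmp = {}
--     chars = list(perms)
--     started = False
--     for cur, nxt in zip(chars, [*chars[1:], None]):
--         if started and cur == "*":
--             continue
--         _tmp[_PRIVILEGES_MAP[cur]] = nxt == "*"
--         started = True
--     return _tmp
-- ===== Notes on version B (the rewrite author's own statement) =====
-- stated objective: alternative
-- what changed: Replaces A's backward state-tracking (remember 'previous' and mutate its entry when a '*' arrives) with a forward look-ahead over (char, next-char) pairs that computes each privilege's GRANT flag directly, skipping non-leading '*' characters.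
-- outside the precondition, e.g. on _process_priv_part('z'): A raises KeyError, B raises KeyError
import Mathlib
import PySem

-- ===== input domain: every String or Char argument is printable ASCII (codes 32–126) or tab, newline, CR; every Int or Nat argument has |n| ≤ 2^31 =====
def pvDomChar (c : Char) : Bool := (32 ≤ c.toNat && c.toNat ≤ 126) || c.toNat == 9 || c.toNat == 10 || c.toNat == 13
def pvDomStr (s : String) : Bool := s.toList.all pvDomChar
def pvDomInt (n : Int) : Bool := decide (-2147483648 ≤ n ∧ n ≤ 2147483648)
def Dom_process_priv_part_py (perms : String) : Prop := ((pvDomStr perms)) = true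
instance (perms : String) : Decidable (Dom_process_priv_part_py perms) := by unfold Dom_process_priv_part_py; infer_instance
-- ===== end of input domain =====

-- B replaces A's backward 'previous'-mutation with a forward look-ahead over (char, next-char)
-- pairs; objective: alternative decomposition (single pass either way, no speed claim).

-- _PRIVILEGES_MAP (shared module constant, used by both programs)
def privMap : PySem.Dict Char String :=
  PySem.Dict.ofList
    [('a', "INSERT"), ('C', "CREATE"), ('D', "TRUNCATE"), ('c', "CONNECT"),
     ('t', "TRIGGER"), ('r', "SELECT"), ('U', "USAGE"), ('T', "TEMPORARY"),
     ('w', "UPDATE"), ('X', "EXECUTE"), ('x', "REFERENCES"), ('d', "DELETE"),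
     ('*', "GRANT")]

-- _PRIVILEGES_MAP[perm]; Python raises KeyError on a missing key — those inputs are
-- excluded by Pre_, the "" default is never reached inside Pre_.
def pm (c : Char) : String := (privMap.get? c).getD ""

-- ===== PORT A =====
-- the for-loop of A, state = (_tmp, previous)
def aLoop : List Char → PySem.Dict String Bool → Option String → PySem.Dict String Bool
  | [], d, _ => d
  | c :: cs, d, none => aLoop cs (d.insert (pm c) false) (some (pm c))
  | c :: cs, d, some p =>
      if c == '*' then aLoop cs (d.insert p true) (some p)
      else aLoop cs (d.insert (pm c) false) (some (pm c))

def process_priv_part_py (perms : String) : List (String × Bool) :=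
  (aLoop perms.toList PySem.Dict.empty none).items

-- ===== PORT B =====
-- the for-loop of B over zip(chars, [*chars[1:], None]), state = (_tmp, started)
def bLoop : List (Char × Option Char) → Bool → PySem.Dict String Bool → PySem.Dict String Bool
  | [], _, d => d
  | (cur, nxt) :: rest, started, d =>
      if started && cur == '*' then bLoop rest started d
      else bLoop rest true (d.insert (pm cur) (nxt == some '*'))

def process_priv_part_py_alt (perms : String) : List (String × Bool) :=
  let chars := perms.toList
  (bLoop (chars.zip (chars.tail.map some ++ [none])) false PySem.Dict.empty).items

-- ===== PRECONDITION & SPEC =====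
-- Pre_ excludes exactly the inputs containing a character outside _PRIVILEGES_MAP,
-- on which the Python A raises KeyError.
def Pre_process_priv_part_py (perms : String) : Prop :=
  perms.toList.all (fun c => c ∈ ['a', 'C', 'D', 'c', 't', 'r', 'U', 'T', 'w', 'X', 'x', 'd', '*']) = true
instance (perms : String) : Decidable (Pre_process_priv_part_py perms) := by
  unfold Pre_process_priv_part_py; infer_instance

def pvWitness_process_priv_part_py : String := "ar*w"

def Spec_process_priv_part_py (perms : String) (out : List (String × Bool)) : Prop := out = process_priv_part_py_alt perms
instance (perms : String) (out : List (String × Bool)) : Decidable (Spec_process_priv_part_py perms out) := by unfold Spec_process_priv_part_py; infer_instance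

-- ===== CLAIM (what is proved, stated in full; the proofs are below) =====
def Claim_equal_process_priv_part_py : Prop := ∀ (perms : String), Dom_process_priv_part_py perms → Pre_process_priv_part_py perms → Spec_process_priv_part_py perms (process_priv_part_py perms)

-- ===== LEMMAS AND PROOFS =====

-- After both loops have processed the same first character (key p, A's flag b, B's flag
-- b || "next char is a star"), they compute the same dictionary.
lemma aLoop_eq_bLoop (cs : List Char) :
    ∀ (d : PySem.Dict String Bool) (p : String) (b : Bool),
    aLoop cs (d.insert p b) (some p)
      = bLoop (cs.zip (cs.tail.map some ++ [none])) true
          (d.insert p (b || (cs.head? == some '*'))) := by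
  induction cs with
  | nil => intro d p b; simp [aLoop, bLoop]
  | cons c cs ih =>
    intro d p b
    by_cases hc : c = '*'
    · subst hc
      cases cs with
      | nil =>
        simp [aLoop, bLoop, PySem.Dict.insert_insert_self]
      | cons c' cs' =>
        have h := ih d p true
        simp only [Bool.true_or] at h
        simp only [List.tail_cons, List.map_cons, List.cons_append, List.zip_cons_cons,
          List.head?_cons, aLoop, bLoop] at h ⊢
        simpa [PySem.Dict.insert_insert_self] using h
    · have hcb : (c == '*') = false := by simp [hc]
      cases cs with
      | nil =>
        simp [aLoop, bLoop, hcb]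
      | cons c' cs' =>
        have h := ih (d.insert p b) (pm c) false
        simp only [Bool.false_or] at h
        simp only [List.tail_cons, List.map_cons, List.cons_append, List.zip_cons_cons,
          List.head?_cons, aLoop, bLoop, hcb] at h ⊢
        simpa [hc, hcb] using h

-- ===== VERDICT (by name: the statement is the Claim_ definition above) =====
theorem process_priv_part_py_spec : Claim_equal_process_priv_part_py := by
  intro perms _ _
  unfold Spec_process_priv_part_py process_priv_part_py process_priv_part_py_alt
  cases h : perms.toList with
  | nil => simp [aLoop, bLoop]
  | cons c cs =>
    cases cs with
    | nil =>
      simp [aLoop, bLoop]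
    | cons c' cs' =>
      have h2 := aLoop_eq_bLoop (c' :: cs') PySem.Dict.empty (pm c) false
      simp only [Bool.false_or, List.head?_cons] at h2
      simp only [List.tail_cons, List.map_cons, List.cons_append, List.zip_cons_cons,
        aLoop, bLoop, Bool.false_and] at h2 ⊢
      simpa using congrArg PySem.Dict.items h2
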